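-- pv_equiv track=rewrite | github.com/brunoapozzani-collab/taag-despesas-fixas | tools/expense_engine.py | _match_all_companies_in_text
-- ===== SOURCE A (Python) =====
-- PROJETO_ALIASES = {
--     # Rio de Janeiro
--     "rio de janeiro": "Rio de Janeiro",
--     "regus": "Rio de Janeiro",
--     # Alameda 470
--     "alameda gabriel 470": "Alameda 470",
--     "alameda gabriel, 470": "Alameda 470",
--     "alameda 470": "Alameda 470",
--     "gabriel 470": "Alameda 470",
--     "helena cabral magano": "Alameda 470",
--     # Artur de Azevedo
--     "artur de azevedo": "Artur de Azevedo",
--     "rmf": "Artur de Azevedo",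
--     # Mazzini
--     "mazzini": "Mazzini",
--     "uniart": "Mazzini",
--     # Alameda 334
--     "alameda 334": "Alameda 334",
--     "alameda gabriel 334": "Alameda 334",
--     "ralph": "Alameda 334",
--     "focal": "Alameda 334",
-- }
--
-- def _match_all_companies_in_text(text: str) -> list[str]:
--     """Return all distinct companies mentioned in a text blob, preserving order."""
--     if not text:
--         return []
--     found: list[str] = []
--     for key, canon in PROJETO_ALIASES.items():
--         if key in text and canon not in found:
--             found.append(canon)
--     return found
-- ===== SOURCE B (Python) =====
-- # Grouped alias table written directly: each canonical company with its aliases,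
-- # in the same canonical first-seen order as the flat alias dict.
-- _CANON_GROUPS = [
--     ("Rio de Janeiro", ("rio de janeiro", "regus")),
--     ("Alameda 470", ("alameda gabriel 470", "alameda gabriel, 470", "alameda 470",
--                      "gabriel 470", "helena cabral magano")),
--     ("Artur de Azevedo", ("artur de azevedo", "rmf")),
--     ("Mazzini", ("mazzini", "uniart")),
--     ("Alameda 334", ("alameda 334", "alameda gabriel 334", "ralph", "focal")),
-- ]
--
--
-- def _match_all_companies_in_text(text: str) -> list[str]:
--     """Return all distinct companies mentioned in a text blob, preserving order."""
--     return [canon for canon, aliases in _CANON_GROUPS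
--             if any(a in text for a in aliases)]
-- ===== Notes on version B (the rewrite author's own statement) =====
-- stated objective: simpler
-- what changed: B replaces A's flat alias-dict loop with a per-item dedup scan of the found list by a hand-grouped canon->aliases table traversed once with a comprehension emitting each canon iff any of its aliases occurs; it also drops the redundant empty-text guard since no alias is empty.
import Mathlib
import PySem

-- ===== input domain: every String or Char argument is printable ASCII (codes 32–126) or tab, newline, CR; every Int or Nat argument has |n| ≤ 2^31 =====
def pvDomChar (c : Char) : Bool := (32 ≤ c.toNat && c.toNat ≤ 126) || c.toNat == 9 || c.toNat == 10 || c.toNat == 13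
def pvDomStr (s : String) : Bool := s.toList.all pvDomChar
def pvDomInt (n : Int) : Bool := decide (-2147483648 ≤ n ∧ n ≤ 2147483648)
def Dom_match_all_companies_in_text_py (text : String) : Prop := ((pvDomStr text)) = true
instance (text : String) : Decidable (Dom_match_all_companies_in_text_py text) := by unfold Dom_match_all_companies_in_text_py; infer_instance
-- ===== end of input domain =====

-- B traverses a hand-grouped canon->aliases table once, emitting each canon iff any alias
-- occurs, instead of A's flat alias loop with a dedup scan of 'found' (objective: simpler).

-- ===== PORT A =====
-- the module constant PROJETO_ALIASES (a dict: association list in insertion order)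
def PROJETO_ALIASES : List (String × String) :=
  [("rio de janeiro", "Rio de Janeiro"), ("regus", "Rio de Janeiro"),
   ("alameda gabriel 470", "Alameda 470"), ("alameda gabriel, 470", "Alameda 470"),
   ("alameda 470", "Alameda 470"), ("gabriel 470", "Alameda 470"),
   ("helena cabral magano", "Alameda 470"),
   ("artur de azevedo", "Artur de Azevedo"), ("rmf", "Artur de Azevedo"),
   ("mazzini", "Mazzini"), ("uniart", "Mazzini"),
   ("alameda 334", "Alameda 334"), ("alameda gabriel 334", "Alameda 334"),
   ("ralph", "Alameda 334"), ("focal", "Alameda 334")]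

def match_all_companies_in_text_py (text : String) : List String :=
  if text.toList = [] then []
  else
    PROJETO_ALIASES.foldl
      (fun found kc =>
        if PySem.Str.isIn kc.1 text && !found.contains kc.2 then found ++ [kc.2] else found)
      []

-- ===== PORT B =====
-- B's module constant _CANON_GROUPS: one entry per canonical company with its aliases
def pvCanonGroups : List (String × List String) :=
  [("Rio de Janeiro", ["rio de janeiro", "regus"]),
   ("Alameda 470", ["alameda gabriel 470", "alameda gabriel, 470", "alameda 470",
                    "gabriel 470", "helena cabral magano"]),
   ("Artur de Azevedo", ["artur de azevedo", "rmf"]),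
   ("Mazzini", ["mazzini", "uniart"]),
   ("Alameda 334", ["alameda 334", "alameda gabriel 334", "ralph", "focal"])]

def match_all_companies_in_text_py_alt (text : String) : List String :=
  (pvCanonGroups.filter (fun g => g.2.any (fun a => PySem.Str.isIn a text))).map Prod.fst

-- ===== PRECONDITION & SPEC =====
def Spec_match_all_companies_in_text_py (text : String) (out : List String) : Prop := out = match_all_companies_in_text_py_alt text
instance (text : String) (out : List String) : Decidable (Spec_match_all_companies_in_text_py text out) := by unfold Spec_match_all_companies_in_text_py; infer_instance

-- ===== CLAIM (what is proved, stated in full; the proofs are below) =====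
def Claim_equal_match_all_companies_in_text_py : Prop := ∀ (text : String), Dom_match_all_companies_in_text_py text → Spec_match_all_companies_in_text_py text (match_all_companies_in_text_py text)

-- ===== LEMMAS AND PROOFS =====

-- A's loop step
def pvStepA (text : String) (found : List String) (kc : String × String) : List String :=
  if PySem.Str.isIn kc.1 text && !found.contains kc.2 then found ++ [kc.2] else found

-- once the canon is in found, the rest of its block changes nothing
theorem pvSkip (text : String) (c : String) (ks : List String) (found : List String)
    (hc : c ∈ found) :
    (ks.map (fun k => (k, c))).foldl (pvStepA text) found = found := by
  induction ks with
  | nil => rfl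
  | cons k ks ih => simp [pvStepA, hc, ih]

-- a whole block of aliases for one fresh canon appends [c] iff any alias occurs
theorem pvBlock (text : String) (c : String) (ks : List String) (found : List String)
    (hc : c ∉ found) :
    (ks.map (fun k => (k, c))).foldl (pvStepA text) found
      = found ++ (if ks.any (fun k => PySem.Str.isIn k text) then [c] else []) := by
  induction ks with
  | nil => simp
  | cons k ks ih =>
    by_cases h : PySem.Chars.isIn k.toList text.toList = true
    · simp [pvStepA, h, hc, pvSkip]
    · simp only [Bool.not_eq_true] at h
      simp [pvStepA, h, hc, ih]

-- grouped view of A's fold: over blocks with pairwise-distinct, fresh canons it is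
-- found ++ (B's filter-then-project over the same blocks)
theorem pvMain (text : String) (blocks : List (String × List String)) (found : List String)
    (hfresh : ∀ ck ∈ blocks, ck.1 ∉ found)
    (hnd : blocks.Pairwise (fun a b => a.1 ≠ b.1)) :
    (blocks.flatMap (fun ck => ck.2.map (fun k => (k, ck.1)))).foldl (pvStepA text) found
      = found ++ (blocks.filter (fun g => g.2.any (fun a => PySem.Str.isIn a text))).map Prod.fst := by
  induction blocks generalizing found with
  | nil => simp
  | cons b bs ih =>
    rw [List.flatMap_cons, List.foldl_append]
    rw [pvBlock text b.1 b.2 found (hfresh b (by simp))]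
    have hfresh' : ∀ ck ∈ bs,
        ck.1 ∉ found ++ (if b.2.any (fun k => PySem.Str.isIn k text) then [b.1] else []) := by
      intro ck hck
      have h1 : ck.1 ∉ found := hfresh ck (by simp [hck])
      have h2 : ck.1 ≠ b.1 := by
        have := (List.pairwise_cons.mp hnd).1 ck hck
        exact fun h => this h.symm
      simp only [List.mem_append, not_or]
      refine ⟨h1, ?_⟩
      split <;> simp [h2]
    rw [ih _ hfresh' (List.pairwise_cons.mp hnd).2]
    rw [List.filter_cons]
    split <;> simp_all

-- A's flat table factors into exactly B's grouped blocks
theorem pvTable_eq :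
    PROJETO_ALIASES = pvCanonGroups.flatMap (fun ck => ck.2.map (fun k => (k, ck.1))) := by
  decide

-- on the empty string B also returns [] (no alias is empty)
theorem pvAltEmpty : match_all_companies_in_text_py_alt "" = [] := by decide

-- ===== VERDICT (by name: the statement is the Claim_ definition above) =====
theorem match_all_companies_in_text_py_spec : Claim_equal_match_all_companies_in_text_py := by
  intro text _
  unfold Spec_match_all_companies_in_text_py match_all_companies_in_text_py
  split
  · rename_i h
    rw [String.toList_eq_nil_iff.mp h, pvAltEmpty]
  · unfold match_all_companies_in_text_py_alt
    rw [pvTable_eq]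
    exact pvMain text pvCanonGroups [] (by intro ck _ h; cases h) (by decide)
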